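-- pv_equiv track=rewrite | github.com/biocompute-inc/OT2-BRICK-MIX-PROTOCOLS | scripts/build_brick_mix_py.py | find_labware_ids
-- ===== SOURCE A (Python) =====
-- def find_labware_ids(pd_data):
--     unmod_id = mod_id = mix_id = None
--     for lw_id, lw in pd_data["labware"].items():
--         name = lw.get("displayName", "").lower()
--         if name == "unmod bricks":
--             unmod_id = lw_id
--         elif name == "mod bricks":
--             mod_id = lw_id
--         elif name == "brick mix":
--             mix_id = lw_id
--     return unmod_id, mod_id, mix_id
-- ===== SOURCE B (Python) =====
-- def find_labware_ids(pd_data):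
--     items = list(pd_data["labware"].items())
--
--     def last_match(target):
--         # scan back-to-front; the first hit is the last forward match
--         for lw_id, lw in reversed(items):
--             if lw.get("displayName", "").lower() == target:
--                 return lw_id
--         return None
--
--     return (last_match("unmod bricks"),
--             last_match("mod bricks"),
--             last_match("brick mix"))
-- ===== Notes on version B (the rewrite author's own statement) =====
-- stated objective: alternative
-- what changed: Replaces A's single forward pass with three mutable result slots by three independent back-to-front searches, each returning the first match found while scanning the items in reverse (which is exactly A's last-match-wins).
import Mathlib
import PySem

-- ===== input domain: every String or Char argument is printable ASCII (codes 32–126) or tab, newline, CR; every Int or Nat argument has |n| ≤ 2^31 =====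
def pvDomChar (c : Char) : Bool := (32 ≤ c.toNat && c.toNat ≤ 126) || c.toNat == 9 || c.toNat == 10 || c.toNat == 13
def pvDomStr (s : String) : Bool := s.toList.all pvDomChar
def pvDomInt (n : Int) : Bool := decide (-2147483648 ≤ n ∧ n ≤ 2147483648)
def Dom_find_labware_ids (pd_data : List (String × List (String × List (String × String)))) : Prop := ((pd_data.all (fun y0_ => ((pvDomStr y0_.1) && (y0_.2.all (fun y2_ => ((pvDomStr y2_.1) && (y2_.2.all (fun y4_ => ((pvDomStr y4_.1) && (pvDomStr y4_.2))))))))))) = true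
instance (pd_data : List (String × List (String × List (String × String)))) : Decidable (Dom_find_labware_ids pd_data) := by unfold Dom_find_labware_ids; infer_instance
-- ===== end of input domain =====

-- B replaces A's single forward pass with three accumulators by three independent
-- back-to-front first-match searches (first hit scanning reversed = last forward match).

-- ===== PORT A =====
def pvStepA (st : Option String × Option String × Option String)
    (item : String × List (String × String)) :
    Option String × Option String × Option String :=
  let name := PySem.Str.lower ((PySem.Dict.mk item.2).getD "displayName" "")
  if name = "unmod bricks" then (some item.1, st.2.1, st.2.2)
  else if name = "mod bricks" then (st.1, some item.1, st.2.2)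
  else if name = "brick mix" then (st.1, st.2.1, some item.1)
  else st

def find_labware_ids (pd_data : List (String × List (String × List (String × String)))) : Option String × Option String × Option String :=
  match (PySem.Dict.mk pd_data).get? "labware" with
  | none => (none, none, none)  -- KeyError in Python; excluded by Pre_
  | some labware => labware.foldl pvStepA (none, none, none)

-- ===== PORT B =====
def pvName (item : String × List (String × String)) : String :=
  PySem.Str.lower ((PySem.Dict.mk item.2).getD "displayName" "")

-- Source B's last_match: scan the reversed items, return the first matching lw_id
def pvLastMatch (items : List (String × List (String × String))) (target : String) : Option String :=
  (items.reverse.find? (fun it => pvName it == target)).map Prod.fst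

def find_labware_ids_alt (pd_data : List (String × List (String × List (String × String)))) : Option String × Option String × Option String :=
  match (PySem.Dict.mk pd_data).get? "labware" with
  | none => (none, none, none)  -- KeyError in Python; excluded by Pre_
  | some labware =>
    (pvLastMatch labware "unmod bricks",
     pvLastMatch labware "mod bricks",
     pvLastMatch labware "brick mix")

-- ===== PRECONDITION & SPEC =====
-- Pre_ excludes exactly the inputs whose top-level dict has no "labware" key: A raises KeyError there.
def Pre_find_labware_ids (pd_data : List (String × List (String × List (String × String)))) : Prop :=
  ((PySem.Dict.mk pd_data).get? "labware").isSome = true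
instance (pd_data : List (String × List (String × List (String × String)))) : Decidable (Pre_find_labware_ids pd_data) := by unfold Pre_find_labware_ids; infer_instance

def pvWitness_find_labware_ids : (List (String × List (String × List (String × String)))) :=
  [("labware", [("plate1", [("displayName", "Unmod Bricks")])])]

def Spec_find_labware_ids (pd_data : List (String × List (String × List (String × String)))) (out : Option String × Option String × Option String) : Prop := out = find_labware_ids_alt pd_data
instance (pd_data : List (String × List (String × List (String × String)))) (out : Option String × Option String × Option String) : Decidable (Spec_find_labware_ids pd_data out) := by unfold Spec_find_labware_ids; infer_instance

-- ===== CLAIM (what is proved, stated in full; the proofs are below) =====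
def Claim_equal_find_labware_ids : Prop := ∀ (pd_data : List (String × List (String × List (String × String)))), Dom_find_labware_ids pd_data → Pre_find_labware_ids pd_data → Spec_find_labware_ids pd_data (find_labware_ids pd_data)

-- ===== LEMMAS AND PROOFS =====

-- A's fold over xs from state st ends with, in each slot, the last match in xs
-- (i.e. the first match of reversed xs) if any, else st's slot.
lemma pv_fold_last (xs : List (String × List (String × String)))
    (st : Option String × Option String × Option String) :
    xs.foldl pvStepA st =
      (((xs.reverse.find? (fun it => pvName it == "unmod bricks")).map Prod.fst).or st.1,
       ((xs.reverse.find? (fun it => pvName it == "mod bricks")).map Prod.fst).or st.2.1,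
       ((xs.reverse.find? (fun it => pvName it == "brick mix")).map Prod.fst).or st.2.2) := by
  induction xs generalizing st with
  | nil => simp
  | cons x xs ih =>
    simp only [List.foldl_cons, ih (pvStepA st x), List.reverse_cons, List.find?_append]
    cases h1 : xs.reverse.find? (fun it => pvName it == "unmod bricks") <;>
    cases h2 : xs.reverse.find? (fun it => pvName it == "mod bricks") <;>
    cases h3 : xs.reverse.find? (fun it => pvName it == "brick mix") <;>
      simp only [Option.map_some, Option.some_or, Option.none_or, List.find?] <;>
      simp only [pvStepA, pvName] <;>
      split_ifs with c1 c2 c3 <;>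
      (try clear ih) <;> (try clear h1) <;> (try clear h2) <;> (try clear h3) <;>
      (repeat' split) <;>
      simp_all [beq_iff_eq]

-- ===== VERDICT (by name: the statement is the Claim_ definition above) =====
theorem find_labware_ids_spec : Claim_equal_find_labware_ids := by
  intro pd_data _ _
  unfold Spec_find_labware_ids find_labware_ids find_labware_ids_alt
  cases h : (PySem.Dict.mk pd_data).get? "labware" with
  | none => rfl
  | some labware =>
    simp [pv_fold_last, pvLastMatch]
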